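-- pv_equiv track=rewrite | github.com/tlghealthy/Amazons-Board-Game | amazons.py | count_valid_moves_for_player
-- ===== SOURCE A (Python) =====
-- def get_valid_moves_for_unit(board, pos):
--     """
--     Get a list of all valid queen-like moves for a unit at the given position.
--     Moves follow queen-like (straight line) movement through empty cells.
--     """
--     directions = [(1,0), (-1,0), (0,1), (0,-1), (1,1), (-1,-1), (1,-1), (-1,1)]
--     valid_moves = []
--     x0, y0 = pos
--     height = len(board)
--     width = len(board[0])
--     for dx, dy in directions:
--         x, y = x0 + dx, y0 + dy
--         while 0 <= x < width and 0 <= y < height and board[y][x] == "empty":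
--             valid_moves.append((x, y))
--             x += dx
--             y += dy
--     return valid_moves
--
-- def count_valid_moves_for_player(board, player):
--     """
--     Count the total number of valid queen-like moves available for all units belonging to the player.
--     """
--     total_moves = 0
--     height = len(board)
--     width = len(board[0])
--     for y in range(height):
--         for x in range(width):
--             if board[y][x] == player:
--                 moves = get_valid_moves_for_unit(board, (x, y))
--                 total_moves += len(moves)
--     return total_moves
-- ===== SOURCE B (Python) =====
-- def count_valid_moves_for_player(board, player):
--     """
--     DP line-sweep: instead of walking 8 rays from every unit, compute for each
--     cell the length of the run of empty cells adjacent to it in each of the 8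
--     directions via streak counters: one left-to-right / right-to-left scan per
--     row for the horizontal directions, and one top-down plus one bottom-up sweep
--     (carrying per-column streak rows, diagonals via index shift) for the other six.
--     """
--     w = len(board[0])
--     grid = [row[:w] for row in board]
--     E = "empty"
--
--     def runs_before(row):
--         # out[x] = length of the run of empty cells immediately before index x
--         out = []
--         r = 0
--         for c in row:
--             out.append(r)
--             r = r + 1 if c == E else 0
--         return out
--
--     def shifted(prev_run, prev_row, s):
--         # extend the streaks of the previous row, displaced by s (diagonals)
--         return [prev_run[x + s] + 1 if 0 <= x + s < w and prev_row[x + s] == E else 0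
--                 for x in range(w)]
--
--     def horiz(row):
--         L = runs_before(row)
--         R = runs_before(row[::-1])[::-1]
--         return sum(L[x] + R[x] for x in range(w) if row[x] == player)
--
--     def sweep(rows):
--         # credits, for each unit, the empty streaks arriving from the previous rows
--         # (straight up plus the two backward diagonals, relative to iteration order)
--         total = 0
--         z = [0] * w
--         v = d1 = d2 = z
--         prow = [""] * w
--         for row in rows:
--             v = shifted(v, prow, 0)
--             d1 = shifted(d1, prow, -1)
--             d2 = shifted(d2, prow, 1)
--             for x in range(w):
--                 if row[x] == player:
--                     total += v[x] + d1[x] + d2[x]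
--             prow = row
--         return total
--
--     return sum(horiz(row) for row in grid) + sweep(grid) + sweep(grid[::-1])
-- ===== Notes on version B (the rewrite author's own statement) =====
-- stated objective: alternative
-- what changed: Replaces the 8 per-unit ray walks with whole-board streak-table line sweeps: two streak scans per row for the horizontal directions and one top-down plus one bottom-up row sweep (diagonals handled by shifting the carried streak row by one column), so each cell is visited a constant number of times per direction instead of being re-walked from every unit.
import Mathlib
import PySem

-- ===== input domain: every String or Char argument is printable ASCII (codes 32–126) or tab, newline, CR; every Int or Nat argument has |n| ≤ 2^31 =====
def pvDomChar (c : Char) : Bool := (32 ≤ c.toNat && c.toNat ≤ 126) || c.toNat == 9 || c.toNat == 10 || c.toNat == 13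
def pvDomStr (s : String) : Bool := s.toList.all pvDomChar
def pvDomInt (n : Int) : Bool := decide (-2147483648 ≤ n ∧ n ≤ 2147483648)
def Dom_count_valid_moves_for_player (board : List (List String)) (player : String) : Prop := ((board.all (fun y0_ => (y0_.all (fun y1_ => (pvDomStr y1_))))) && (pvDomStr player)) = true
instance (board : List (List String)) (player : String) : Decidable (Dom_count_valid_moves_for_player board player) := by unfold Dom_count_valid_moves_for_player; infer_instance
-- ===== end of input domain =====

-- B replaces the 8 per-unit ray walks by precomputed empty-streak tables: one
-- left/right scan per row and one top-down plus one bottom-up sweep (diagonals by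
-- index shift); objective: alternative algorithm (line sweeps instead of per-unit walks).

-- ===== PORT A =====
def pvCell (g : List (List String)) (x y : Int) : String :=
  PySem.List.pyGetD (PySem.List.pyGetD g y []) x ""

def pvDirs : List (Int × Int) := [(1,0), (-1,0), (0,1), (0,-1), (1,1), (-1,-1), (1,-1), (-1,1)]

-- the while loop of get_valid_moves_for_unit (fuel-bounded; fuel w+h+2 covers any walk)
def pvWalkA (board : List (List String)) (w h dx dy : Int) : Nat → Int → Int → List (Int × Int)
  | 0, _, _ => []
  | Nat.succ n, x, y =>
    if 0 ≤ x ∧ x < w ∧ 0 ≤ y ∧ y < h ∧ pvCell board x y = "empty" then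
      (x, y) :: pvWalkA board w h dx dy n (x + dx) (y + dy)
    else []

def get_valid_moves_for_unit (board : List (List String)) (pos : Int × Int) : List (Int × Int) :=
  let h : Int := board.length
  let w : Int := (PySem.List.pyGetD board 0 []).length
  pvDirs.foldl (fun acc d =>
    acc ++ pvWalkA board w h d.1 d.2 (w.toNat + h.toNat + 2) (pos.1 + d.1) (pos.2 + d.2)) []

def count_valid_moves_for_player (board : List (List String)) (player : String) : Int :=
  let h : Int := board.length
  let w : Int := (PySem.List.pyGetD board 0 []).length
  (PySem.List.pyRange 0 h 1).foldl (fun total y =>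
    (PySem.List.pyRange 0 w 1).foldl (fun total x =>
      if pvCell board x y = player then
        total + ((get_valid_moves_for_unit board (x, y)).length : Int)
      else total) total) 0

-- ===== PORT B =====
def pvRunsBefore (row : List String) : List Int :=
  (row.foldl (fun (p : List Int × Int) c =>
    (p.1 ++ [p.2], if c = "empty" then p.2 + 1 else 0)) ([], 0)).1

def pvShifted (w : Int) (pr : List Int) (prow : List String) (s : Int) : List Int :=
  (PySem.List.pyRange 0 w 1).map (fun x =>
    if 0 ≤ x + s ∧ x + s < w ∧ PySem.List.pyGetD prow (x + s) "" = "empty" then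
      PySem.List.pyGetD pr (x + s) 0 + 1
    else 0)

def pvHoriz (w : Int) (player : String) (row : List String) : Int :=
  let L := pvRunsBefore row
  let R := (pvRunsBefore row.reverse).reverse
  (PySem.List.pyRange 0 w 1).foldl (fun t x =>
    if PySem.List.pyGetD row x "" = player then
      t + (PySem.List.pyGetD L x 0 + PySem.List.pyGetD R x 0)
    else t) 0

def pvSweep (w : Int) (player : String) (rows : List (List String)) : Int :=
  let z : List Int := List.replicate w.toNat 0
  (rows.foldl (fun (st : Int × List Int × List Int × List Int × List String) row =>
      let v := pvShifted w st.2.1 st.2.2.2.2 0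
      let d1 := pvShifted w st.2.2.1 st.2.2.2.2 (-1)
      let d2 := pvShifted w st.2.2.2.1 st.2.2.2.2 1
      let t := (PySem.List.pyRange 0 w 1).foldl (fun t x =>
        if PySem.List.pyGetD row x "" = player then
          t + (PySem.List.pyGetD v x 0 + PySem.List.pyGetD d1 x 0 + PySem.List.pyGetD d2 x 0)
        else t) st.1
      (t, v, d1, d2, row))
    (0, z, z, z, List.replicate w.toNat "")).1

def count_valid_moves_for_player_alt (board : List (List String)) (player : String) : Int :=
  let w : Int := (PySem.List.pyGetD board 0 []).length
  let grid := board.map (fun r => PySem.List.slice r none (some w))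
  (grid.map (pvHoriz w player)).sum + pvSweep w player grid + pvSweep w player grid.reverse

-- ===== PRECONDITION & SPEC =====
-- Pre_ excludes exactly the inputs where Python A raises IndexError: the empty
-- board (board[0]) and ragged boards with a row shorter than the first row.
def Pre_count_valid_moves_for_player (board : List (List String)) (player : String) : Prop :=
  board ≠ [] ∧ ∀ r ∈ board, (board.headD []).length ≤ r.length
instance (board : List (List String)) (player : String) : Decidable (Pre_count_valid_moves_for_player board player) := by unfold Pre_count_valid_moves_for_player; infer_instance

def pvWitness_count_valid_moves_for_player : List (List String) × String :=
  ([["empty", "p1"], ["p1", "empty"]], "p1")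

def Spec_count_valid_moves_for_player (board : List (List String)) (player : String) (out : Int) : Prop := out = count_valid_moves_for_player_alt board player
instance (board : List (List String)) (player : String) (out : Int) : Decidable (Spec_count_valid_moves_for_player board player out) := by unfold Spec_count_valid_moves_for_player; infer_instance

-- ===== CLAIM (what is proved, stated in full; the proofs are below) =====
def Claim_equal_count_valid_moves_for_player : Prop := ∀ (board : List (List String)) (player : String), Dom_count_valid_moves_for_player board player → Pre_count_valid_moves_for_player board player → Spec_count_valid_moves_for_player board player (count_valid_moves_for_player board player)

-- ===== LEMMAS AND PROOFS =====

-- measure for the queen-ray walk: steps until the walk leaves the board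
def pvMu (w h dx dy x y : Int) : Nat :=
  (if 0 < dx then w - x else x + 1).toNat + (if 0 < dy then h - y else y + 1).toNat

lemma pvMu_step (w h dx dy x y : Int) (hne : dx ≠ 0 ∨ dy ≠ 0)
    (h1 : 0 ≤ x) (h2 : x < w) (h3 : 0 ≤ y) (h4 : y < h) :
    pvMu w h dx dy (x + dx) (y + dy) < pvMu w h dx dy x y := by
  rcases hne with h5 | h5 <;> (simp only [pvMu]; split_ifs <;> omega)

-- the exact ray length (count of empty cells from (x,y) onward in direction (dx,dy))
def pvCS (g : List (List String)) (w h dx dy : Int) (hne : dx ≠ 0 ∨ dy ≠ 0) (x y : Int) : Int :=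
  if hc : 0 ≤ x ∧ x < w ∧ 0 ≤ y ∧ y < h ∧ pvCell g x y = "empty" then
    1 + pvCS g w h dx dy hne (x + dx) (y + dy)
  else 0
termination_by pvMu w h dx dy x y
decreasing_by
  exact pvMu_step w h dx dy x y hne hc.1 hc.2.1 hc.2.2.1 hc.2.2.2.1

lemma pvCS_pos (g : List (List String)) (w h dx dy : Int) (hne : dx ≠ 0 ∨ dy ≠ 0) (x y : Int)
    (hc : 0 ≤ x ∧ x < w ∧ 0 ≤ y ∧ y < h ∧ pvCell g x y = "empty") :
    pvCS g w h dx dy hne x y = 1 + pvCS g w h dx dy hne (x + dx) (y + dy) := by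
  rw [pvCS]; simp [hc]

lemma pvCS_neg (g : List (List String)) (w h dx dy : Int) (hne : dx ≠ 0 ∨ dy ≠ 0) (x y : Int)
    (hc : ¬(0 ≤ x ∧ x < w ∧ 0 ≤ y ∧ y < h ∧ pvCell g x y = "empty")) :
    pvCS g w h dx dy hne x y = 0 := by
  rw [pvCS]; simp [hc]

-- the ray credited to a unit at (x,y): walk starts one step away
def pvD (g : List (List String)) (w h dx dy : Int) (hne : dx ≠ 0 ∨ dy ≠ 0) (x y : Int) : Int :=
  pvCS g w h dx dy hne (x + dx) (y + dy)


lemma pvWalkA_len (g : List (List String)) (w h dx dy : Int) (hne : dx ≠ 0 ∨ dy ≠ 0) :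
    ∀ (n : Nat) (x y : Int), pvMu w h dx dy x y ≤ n →
      ((pvWalkA g w h dx dy n x y).length : Int) = pvCS g w h dx dy hne x y := by
  intro n
  induction n with
  | zero =>
    intro x y hmu
    have hc : ¬(0 ≤ x ∧ x < w ∧ 0 ≤ y ∧ y < h ∧ pvCell g x y = "empty") := by
      intro hc
      obtain ⟨h1, h2, h3, h4, -⟩ := hc
      simp only [pvMu] at hmu
      split_ifs at hmu <;> omega
    rw [pvCS_neg g w h dx dy hne x y hc]
    simp [pvWalkA]
  | succ n ih =>
    intro x y hmu
    by_cases hc : 0 ≤ x ∧ x < w ∧ 0 ≤ y ∧ y < h ∧ pvCell g x y = "empty"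
    · have hlt := pvMu_step w h dx dy x y hne hc.1 hc.2.1 hc.2.2.1 hc.2.2.2.1
      rw [pvCS_pos g w h dx dy hne x y hc]
      simp only [pvWalkA, if_pos hc, List.length_cons]
      rw [← ih (x + dx) (y + dy) (by omega)]
      push_cast
      ring
    · rw [pvCS_neg g w h dx dy hne x y hc]
      simp [pvWalkA, if_neg hc]

lemma pvMu_le (w h dx dy x y : Int) (hx : -1 ≤ x) (hx' : x ≤ w) (hy : -1 ≤ y) (hy' : y ≤ h)
    (hw : 0 ≤ w) (hh : 0 ≤ h) :
    pvMu w h dx dy x y ≤ w.toNat + h.toNat + 2 := by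
  simp only [pvMu]
  split_ifs <;> omega

-- list-sum helpers
def pvSum (n : Nat) (f : Nat → Int) : Int := ((List.range n).map f).sum

lemma pvSum_congr (n : Nat) (f g : Nat → Int) (h : ∀ k, k < n → f k = g k) :
    pvSum n f = pvSum n g := by
  unfold pvSum
  exact congrArg List.sum (List.map_congr_left (fun k hk => h k (List.mem_range.mp hk)))

lemma pvSum_add (n : Nat) (f g : Nat → Int) :
    pvSum n (fun k => f k + g k) = pvSum n f + pvSum n g := by
  unfold pvSum; exact PySem.List.sum_map_add_int _ f g

lemma pvSum_cons (n : Nat) (f : Nat → Int) :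
    pvSum (n + 1) f = f 0 + pvSum n (fun k => f (k + 1)) := by
  unfold pvSum
  rw [List.range_succ_eq_map]
  simp [List.map_map, Function.comp_def]

lemma pvSum_succ (n : Nat) (f : Nat → Int) : pvSum (n + 1) f = pvSum n f + f n := by
  unfold pvSum
  rw [List.range_succ]
  simp

lemma pvSum_reflect (n : Nat) (f : Nat → Int) :
    pvSum n (fun k => f (n - 1 - k)) = pvSum n f := by
  induction n with
  | zero => rfl
  | succ n ih =>
    rw [pvSum_cons, pvSum_succ, ← ih]
    have h0 : n + 1 - 1 - 0 = n := by omega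
    rw [h0]
    have h1 : pvSum n (fun k => f (n + 1 - 1 - (k + 1))) = pvSum n (fun k => f (n - 1 - k)) := by
      apply pvSum_congr
      intro k hk
      congr 1
      omega
    rw [h1]
    ring

lemma pvCS_congr (g1 g2 : List (List String)) (w h dx dy : Int) (hne : dx ≠ 0 ∨ dy ≠ 0)
    (hcell : ∀ x y : Int, 0 ≤ x → x < w → 0 ≤ y → y < h → pvCell g1 x y = pvCell g2 x y) :
    ∀ x y : Int, pvCS g1 w h dx dy hne x y = pvCS g2 w h dx dy hne x y := by
  suffices H : ∀ (n : Nat) (x y : Int), pvMu w h dx dy x y = n →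
      pvCS g1 w h dx dy hne x y = pvCS g2 w h dx dy hne x y by
    intro x y; exact H _ x y rfl
  intro n
  induction n using Nat.strong_induction_on with
  | _ n ih =>
    intro x y hn
    by_cases hc : 0 ≤ x ∧ x < w ∧ 0 ≤ y ∧ y < h ∧ pvCell g1 x y = "empty"
    · obtain ⟨h1, h2, h3, h4, h5⟩ := hc
      have hc2 : 0 ≤ x ∧ x < w ∧ 0 ≤ y ∧ y < h ∧ pvCell g2 x y = "empty" :=
        ⟨h1, h2, h3, h4, by rw [← hcell x y h1 h2 h3 h4]; exact h5⟩
      rw [pvCS_pos g1 w h dx dy hne x y ⟨h1, h2, h3, h4, h5⟩, pvCS_pos g2 w h dx dy hne x y hc2]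
      have hlt := pvMu_step w h dx dy x y hne h1 h2 h3 h4
      rw [ih _ (by omega) (x + dx) (y + dy) rfl]
    · have hc2 : ¬(0 ≤ x ∧ x < w ∧ 0 ≤ y ∧ y < h ∧ pvCell g2 x y = "empty") := by
        intro hc2
        obtain ⟨h1, h2, h3, h4, h5⟩ := hc2
        exact hc ⟨h1, h2, h3, h4, by rw [hcell x y h1 h2 h3 h4]; exact h5⟩
      rw [pvCS_neg g1 w h dx dy hne x y hc, pvCS_neg g2 w h dx dy hne x y hc2]

lemma pvCell_reverse (g : List (List String)) (h x y : Int) (hh : h = (g.length : Int))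
    (hy0 : 0 ≤ y) (hy : y < h) : pvCell g.reverse x y = pvCell g x (h - 1 - y) := by
  unfold pvCell
  have h1 : PySem.List.pyGetD g.reverse y [] = PySem.List.pyGetD g (h - 1 - y) [] := by
    rw [PySem.List.pyGetD_eq_getElem g.reverse [] hy0 (by simp; omega),
        PySem.List.pyGetD_eq_getElem g [] (by omega) (by omega)]
    rw [List.getElem_reverse]
    congr 1
    omega
  rw [h1]

lemma pvCS_flip (g : List (List String)) (w h dx dy : Int) (hne : dx ≠ 0 ∨ dy ≠ 0)
    (dy' : Int) (hne' : dx ≠ 0 ∨ dy' ≠ 0) (hdy' : dy' = -dy) (hh : h = (g.length : Int)) :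
    ∀ x y : Int, pvCS g.reverse w h dx dy hne x y = pvCS g w h dx dy' hne' x (h - 1 - y) := by
  subst hdy'
  suffices H : ∀ (n : Nat) (x y : Int), pvMu w h dx dy x y = n →
      pvCS g.reverse w h dx dy hne x y = pvCS g w h dx (-dy) hne' x (h - 1 - y) by
    intro x y; exact H _ x y rfl
  intro n
  induction n using Nat.strong_induction_on with
  | _ n ih =>
    intro x y hn
    by_cases hc : 0 ≤ x ∧ x < w ∧ 0 ≤ y ∧ y < h ∧ pvCell g.reverse x y = "empty"
    · obtain ⟨h1, h2, h3, h4, h5⟩ := hc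
      have hc2 : 0 ≤ x ∧ x < w ∧ 0 ≤ h - 1 - y ∧ h - 1 - y < h ∧ pvCell g x (h - 1 - y) = "empty" :=
        ⟨h1, h2, by omega, by omega, by rw [← pvCell_reverse g h x y hh h3 h4]; exact h5⟩
      rw [pvCS_pos g.reverse w h dx dy hne x y ⟨h1, h2, h3, h4, h5⟩,
          pvCS_pos g w h dx (-dy) hne' x (h - 1 - y) hc2]
      have hlt := pvMu_step w h dx dy x y hne h1 h2 h3 h4
      rw [ih _ (by omega) (x + dx) (y + dy) rfl]
      congr 2
      omega
    · have hc2 : ¬(0 ≤ x ∧ x < w ∧ 0 ≤ h - 1 - y ∧ h - 1 - y < h ∧ pvCell g x (h - 1 - y) = "empty") := by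
        intro hc2
        obtain ⟨h1, h2, h3, h4, h5⟩ := hc2
        refine hc ⟨h1, h2, by omega, by omega, ?_⟩
        rw [pvCell_reverse g h x y hh (by omega) (by omega)]
        exact h5
      rw [pvCS_neg g.reverse w h dx dy hne x y hc, pvCS_neg g w h dx (-dy) hne' x (h - 1 - y) hc2]

-- 1-D characterisation of runs_before
def pvRBlist : List String → Int → List Int
  | [], _ => []
  | c :: t, r => r :: pvRBlist t (if c = "empty" then r + 1 else 0)

lemma pvRunsBefore_aux (row : List String) : ∀ (acc : List Int) (r : Int),
    (row.foldl (fun (p : List Int × Int) c =>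
      (p.1 ++ [p.2], if c = "empty" then p.2 + 1 else 0)) (acc, r)).1 = acc ++ pvRBlist row r := by
  induction row with
  | nil => intro acc r; simp [pvRBlist]
  | cons c t ih =>
    intro acc r
    simp only [List.foldl_cons, pvRBlist]
    rw [ih]
    simp

lemma pvRunsBefore_eq (row : List String) : pvRunsBefore row = pvRBlist row 0 := by
  unfold pvRunsBefore
  rw [pvRunsBefore_aux row [] 0]
  simp

lemma length_pvRBlist (row : List String) : ∀ r : Int, (pvRBlist row r).length = row.length := by
  induction row with
  | nil => intro r; simp [pvRBlist]
  | cons c t ih => intro r; simp [pvRBlist, ih]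

def pvRBseed (c : Nat → String) (r : Int) : Nat → Int
  | 0 => r
  | x + 1 => if c x = "empty" then pvRBseed c r x + 1 else 0

lemma pvRBseed_cons (c : String) (t : List String) (r : Int) : ∀ x : Nat,
    pvRBseed (fun k => (c :: t).getD k "") r (x + 1) =
      pvRBseed (fun k => t.getD k "") (if c = "empty" then r + 1 else 0) x := by
  intro x
  induction x with
  | zero => simp [pvRBseed]
  | succ x ih =>
    show (if (c :: t).getD (x + 1) "" = "empty" then pvRBseed (fun k => (c :: t).getD k "") r (x + 1) + 1 else 0) = _
    rw [ih]
    simp [pvRBseed]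

lemma pvRBlist_getD (row : List String) : ∀ (x : Nat) (r : Int), x < row.length →
    (pvRBlist row r).getD x 0 = pvRBseed (fun k => row.getD k "") r x := by
  induction row with
  | nil => intro x r hx; simp at hx
  | cons c t ih =>
    intro x r hx
    cases x with
    | zero => simp [pvRBlist, pvRBseed]
    | succ x =>
      simp only [pvRBlist, List.getD_cons_succ]
      rw [ih x _ (by simpa using hx)]
      rw [pvRBseed_cons]


lemma pvFold_ite (n : Nat) (P : Nat → Prop) [DecidablePred P] (f : Nat → Int) (a : Int) :
    List.foldl (fun t k => if P k then t + f k else t) a (List.range n)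
      = a + pvSum n (fun k => if P k then f k else 0) := by
  unfold pvSum
  rw [show (fun (t : Int) (k : Nat) => if P k then t + f k else t)
        = (fun (t : Int) (k : Nat) => t + (if P k then f k else 0)) by
    funext t k; split_ifs <;> simp]
  exact PySem.List.foldl_add _ _ _

lemma pvMapSum (l : List (List String)) (f : List String → Int) :
    (l.map f).sum = pvSum l.length (fun i => f (l.getD i [])) := by
  induction l with
  | nil => simp [pvSum]
  | cons c t ih =>
    rw [List.map_cons, List.sum_cons, ih, List.length_cons, pvSum_cons]
    simp

lemma rb_eq_csW (board : List (List String)) (wn m : Nat) (row : List String) (y : Nat)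
    (hy : y < m) (hlen : row.length = wn)
    (hcell : ∀ k, k < wn → row.getD k "" = pvCell board (↑k) (↑y)) :
    ∀ x : Nat, x ≤ wn →
      pvRBseed (fun k => row.getD k "") 0 x
        = pvCS board (↑wn) (↑m) (-1) 0 (by decide) ((x : Int) - 1) (↑y) := by
  intro x
  induction x with
  | zero =>
    intro _
    rw [pvCS_neg _ _ _ _ _ _ _ _ (by intro hc; have := hc.1; omega)]
    rfl
  | succ x ih =>
    intro hx
    have hx' : x < wn := by omega
    have hco : ((x + 1 : Nat) : Int) - 1 = (x : Int) := by push_cast; ring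
    show (if row.getD x "" = "empty" then pvRBseed (fun k => row.getD k "") 0 x + 1 else 0) = _
    rw [hco, hcell x hx']
    by_cases hE : pvCell board (↑x) (↑y) = "empty"
    · rw [if_pos hE,
        pvCS_pos _ _ _ _ _ _ _ _ ⟨by omega, by exact_mod_cast hx', by omega, by exact_mod_cast hy, hE⟩]
      have e1 : (x : Int) + -1 = (x : Int) - 1 := by ring
      have e2 : (y : Int) + 0 = (y : Int) := by ring
      rw [e1, e2, ← ih (by omega)]
      ring
    · rw [if_neg hE, pvCS_neg _ _ _ _ _ _ _ _ (fun hc => hE hc.2.2.2.2)]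

lemma rbrev_eq_csE (board : List (List String)) (wn m : Nat) (row : List String) (y : Nat)
    (hy : y < m) (hlen : row.length = wn)
    (hcell : ∀ k, k < wn → row.getD k "" = pvCell board (↑k) (↑y)) :
    ∀ j : Nat, j ≤ wn →
      pvRBseed (fun k => row.reverse.getD k "") 0 j
        = pvCS board (↑wn) (↑m) 1 0 (by decide) ((wn : Int) - (j : Int)) (↑y) := by
  intro j
  induction j with
  | zero =>
    intro _
    rw [pvCS_neg _ _ _ _ _ _ _ _ (by intro hc; have := hc.2.1; omega)]
    rfl
  | succ j ih =>
    intro hj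
    have hj' : j < wn := by omega
    have hrev : row.reverse.getD j "" = row.getD (wn - 1 - j) "" := by
      have h1 : j < row.reverse.length := by simp [hlen]; omega
      have h2 : wn - 1 - j < row.length := by omega
      rw [List.getD_eq_getElem _ _ h1, List.getD_eq_getElem _ _ h2, List.getElem_reverse]
      congr 1
      omega
    have hco : (wn : Int) - ((j + 1 : Nat) : Int) = ((wn - 1 - j : Nat) : Int) := by
      omega
    show (if row.reverse.getD j "" = "empty" then pvRBseed (fun k => row.reverse.getD k "") 0 j + 1 else 0) = _
    rw [hrev, hcell _ (by omega), hco]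
    by_cases hE : pvCell board (↑(wn - 1 - j)) (↑y) = "empty"
    · rw [if_pos hE,
        pvCS_pos _ _ _ _ _ _ _ _ ⟨by omega, by exact_mod_cast (by omega : wn - 1 - j < wn), by omega, by exact_mod_cast hy, hE⟩]
      have e1 : ((wn - 1 - j : Nat) : Int) + 1 = (wn : Int) - (j : Int) := by
        omega
      have e2 : (y : Int) + 0 = (y : Int) := by ring
      rw [e1, e2, ← ih (by omega)]
      ring
    · rw [if_neg hE, pvCS_neg _ _ _ _ _ _ _ _ (fun hc => hE hc.2.2.2.2)]

lemma horiz_eq (board : List (List String)) (wn m : Nat) (player : String) (y : Nat)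
    (hy : y < m) (row : List String) (hlen : row.length = wn)
    (hcell : ∀ k, k < wn → row.getD k "" = pvCell board (↑k) (↑y)) :
    pvHoriz (↑wn) player row = pvSum wn (fun x =>
      if pvCell board (↑x) (↑y) = player then
        pvD board (↑wn) (↑m) (-1) 0 (by decide) (↑x) (↑y)
          + pvD board (↑wn) (↑m) 1 0 (by decide) (↑x) (↑y)
      else 0) := by
  unfold pvHoriz
  rw [PySem.List.pyRange_zero_natCast, List.foldl_map]
  rw [show (fun (t : Int) (k : Nat) =>
        if PySem.List.pyGetD row (↑k) "" = player then
          t + (PySem.List.pyGetD (pvRunsBefore row) (↑k) 0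
            + PySem.List.pyGetD ((pvRunsBefore row.reverse).reverse) (↑k) 0)
        else t)
      = (fun (t : Int) (k : Nat) => t + (if PySem.List.pyGetD row (↑k) "" = player then
          PySem.List.pyGetD (pvRunsBefore row) (↑k) 0
            + PySem.List.pyGetD ((pvRunsBefore row.reverse).reverse) (↑k) 0 else 0)) by
    funext t k; split_ifs <;> simp]
  rw [PySem.List.foldl_add, zero_add]
  apply pvSum_congr
  intro k hk
  have h1 : PySem.List.pyGetD row (↑k) "" = pvCell board (↑k) (↑y) := by
    rw [PySem.List.pyGetD_natCast, hcell k hk]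
  have hL : PySem.List.pyGetD (pvRunsBefore row) (↑k) 0
      = pvD board (↑wn) (↑m) (-1) 0 (by decide) (↑k) (↑y) := by
    rw [PySem.List.pyGetD_natCast, pvRunsBefore_eq,
        pvRBlist_getD row k 0 (by rw [hlen]; exact hk),
        rb_eq_csW board wn m row y hy hlen hcell k (by omega)]
    unfold pvD
    rw [show ((k : Int) + -1) = (k : Int) - 1 by omega, show ((y : Int) + 0) = (y : Int) by omega]
  have hR : PySem.List.pyGetD ((pvRunsBefore row.reverse).reverse) (↑k) 0
      = pvD board (↑wn) (↑m) 1 0 (by decide) (↑k) (↑y) := by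
    rw [PySem.List.pyGetD_natCast]
    have hlenR : (pvRunsBefore row.reverse).length = wn := by
      rw [pvRunsBefore_eq, length_pvRBlist, List.length_reverse, hlen]
    have hk1 : k < (pvRunsBefore row.reverse).reverse.length := by simp [hlenR]; omega
    have hk2 : wn - 1 - k < (pvRunsBefore row.reverse).length := by omega
    have hg : ((pvRunsBefore row.reverse).reverse).getD k 0 =
        (pvRunsBefore row.reverse).getD (wn - 1 - k) 0 := by
      rw [List.getD_eq_getElem _ _ hk1, List.getD_eq_getElem _ _ hk2, List.getElem_reverse]
      congr 1
      simp [hlenR]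
    rw [hg, pvRunsBefore_eq, pvRBlist_getD _ _ _ (by rw [List.length_reverse, hlen]; omega)]
    rw [rbrev_eq_csE board wn m row y hy hlen hcell (wn - 1 - k) (by omega)]
    unfold pvD
    rw [show ((wn : Int) - ((wn - 1 - k : Nat) : Int)) = (k : Int) + 1 by omega,
        show ((y : Int) + 0) = (y : Int) by omega]
  rw [h1, hL, hR]


lemma pv_getD_map_range {α : Type} (f : Nat → α) (d : α) (n x : Nat) (hx : x < n) :
    PySem.List.pyGetD ((List.range n).map f) (↑x) d = f x := by
  rw [PySem.List.pyGetD_natCast, List.getD_eq_getElem _ _ (by simpa using hx),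
      List.getElem_map, List.getElem_range]

lemma pv_getD_map_range_int {α : Type} (f : Nat → α) (d : α) (n : Nat) (i : Int)
    (h0 : 0 ≤ i) (h1 : i < (n : Int)) :
    PySem.List.pyGetD ((List.range n).map f) i d = f i.toNat := by
  rw [PySem.List.pyGetD_eq_getElem _ _ h0 (by simp; omega), List.getElem_map, List.getElem_range]

-- streak-table state of the sweep, entering iteration j: ray lengths toward smaller row index
def pvSrow (gg : List (List String)) (wn : Nat) (dx : Int) (hne : dx ≠ 0 ∨ (-1 : Int) ≠ 0)
    (j : Int) : List Int :=
  (List.range wn).map (fun (x : Nat) => pvCS gg (↑wn) (↑gg.length) dx (-1) hne ((x : Int) + dx) (j - 2))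

def pvSPR (gg : List (List String)) (wn k : Nat) : List String :=
  if k = 0 then List.replicate wn "" else gg.getD (k - 1) []

def pvRowDown (gg : List (List String)) (wn : Nat) (player : String) (k : Nat) : Int :=
  pvSum wn (fun x =>
    if pvCell gg (↑x) (↑k) = player then
      pvD gg (↑wn) (↑gg.length) 0 (-1) (by decide) (↑x) (↑k)
        + pvD gg (↑wn) (↑gg.length) (-1) (-1) (by decide) (↑x) (↑k)
        + pvD gg (↑wn) (↑gg.length) 1 (-1) (by decide) (↑x) (↑k)
    else 0)

lemma pvSrow_nonpos (gg : List (List String)) (wn : Nat) (dx : Int)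
    (hne : dx ≠ 0 ∨ (-1 : Int) ≠ 0) (j : Int) (hj : j ≤ 1) :
    pvSrow gg wn dx hne j = List.replicate wn 0 := by
  unfold pvSrow
  rw [List.eq_replicate_iff]
  constructor
  · simp
  · intro b hb
    simp only [List.mem_map, List.mem_range] at hb
    obtain ⟨x, -, hx⟩ := hb
    rw [← hx, pvCS_neg _ _ _ _ _ _ _ _ (by intro hc; have := hc.2.2.1; omega)]

lemma pvShifted_step (gg : List (List String)) (wn : Nat) (dx : Int)
    (hne : dx ≠ 0 ∨ (-1 : Int) ≠ 0) (k : Nat) (hk : k < gg.length) :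
    pvShifted (↑wn) (pvSrow gg wn dx hne (↑k)) (pvSPR gg wn k) dx
      = pvSrow gg wn dx hne ((↑k : Int) + 1) := by
  unfold pvShifted pvSrow
  rw [PySem.List.pyRange_zero_natCast, List.map_map]
  apply List.map_congr_left
  intro x hx
  have hxw : x < wn := List.mem_range.mp hx
  simp only [Function.comp_apply]
  rw [show ((k : Int) + 1 - 2) = (k : Int) - 1 by ring]
  by_cases hk0 : k = 0
  · subst hk0
    have hnc : ¬(0 ≤ (x : Int) + dx ∧ (x : Int) + dx < (wn : Int) ∧
        PySem.List.pyGetD (pvSPR gg wn 0) ((x : Int) + dx) "" = "empty") := by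
      rintro ⟨ha, hb, hcc⟩
      rw [show pvSPR gg wn 0 = List.replicate wn "" by rfl] at hcc
      rw [PySem.List.pyGetD_eq_getElem _ _ ha (by simp; omega)] at hcc
      simp at hcc
    rw [if_neg hnc, pvCS_neg _ _ _ _ _ _ _ _ (by intro hc; have := hc.2.2.1; omega)]
  · have hk1 : ((k - 1 : Nat) : Int) = (k : Int) - 1 := by omega
    have hcellrow : PySem.List.pyGetD (pvSPR gg wn k) ((x : Int) + dx) ""
        = pvCell gg ((x : Int) + dx) ((k : Int) - 1) := by
      rw [show pvSPR gg wn k = gg.getD (k - 1) [] by simp [pvSPR, hk0]]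
      unfold pvCell
      rw [← hk1, PySem.List.pyGetD_natCast]
    rw [hcellrow]
    by_cases hcnd : 0 ≤ (x : Int) + dx ∧ (x : Int) + dx < (wn : Int) ∧
        pvCell gg ((x : Int) + dx) ((k : Int) - 1) = "empty"
    · obtain ⟨ha, hb, hcc⟩ := hcnd
      rw [if_pos ⟨ha, hb, hcc⟩,
        pvCS_pos _ _ _ _ _ _ _ _ ⟨ha, hb, by omega, by omega, hcc⟩,
        pv_getD_map_range_int _ 0 wn ((x : Int) + dx) ha hb,
        Int.toNat_of_nonneg ha,
        show ((k : Int) - 1 + -1) = (k : Int) - 2 by ring]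
      omega
    · rw [if_neg hcnd, pvCS_neg _ _ _ _ _ _ _ _ (fun hc => hcnd ⟨hc.1, hc.2.1, hc.2.2.2.2⟩)]

lemma pvSweep_aux (gg : List (List String)) (wn : Nat) (player : String) :
    ∀ (rest : List (List String)) (k : Nat) (t0 : Int)
      (sv sd1 sd2 : List Int) (spr : List String),
      gg.drop k = rest →
      sv = pvSrow gg wn 0 (by decide) (↑k) →
      sd1 = pvSrow gg wn (-1) (by decide) (↑k) →
      sd2 = pvSrow gg wn 1 (by decide) (↑k) →
      spr = pvSPR gg wn k →
      (rest.foldl (fun (st : Int × List Int × List Int × List Int × List String) row =>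
          let v := pvShifted (↑wn) st.2.1 st.2.2.2.2 0
          let d1 := pvShifted (↑wn) st.2.2.1 st.2.2.2.2 (-1)
          let d2 := pvShifted (↑wn) st.2.2.2.1 st.2.2.2.2 1
          let t := (PySem.List.pyRange 0 (↑wn) 1).foldl (fun t x =>
            if PySem.List.pyGetD row x "" = player then
              t + (PySem.List.pyGetD v x 0 + PySem.List.pyGetD d1 x 0 + PySem.List.pyGetD d2 x 0)
            else t) st.1
          (t, v, d1, d2, row)) (t0, sv, sd1, sd2, spr)).1
        = t0 + pvSum (gg.length - k) (fun j => pvRowDown gg wn player (k + j)) := by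
  intro rest
  induction rest with
  | nil =>
    intro k t0 sv sd1 sd2 spr hdrop hv hd1 hd2 hpr
    have hlen : gg.length ≤ k := by
      have := congrArg List.length hdrop
      simp at this
      omega
    simp only [List.foldl_nil]
    rw [show gg.length - k = 0 by omega]
    simp [pvSum]
  | cons row rest' ih =>
    intro k t0 sv sd1 sd2 spr hdrop hv hd1 hd2 hpr
    have hk : k < gg.length := by
      have := congrArg List.length hdrop
      simp at this
      omega
    have h0 : (List.drop k gg)[0]? = some row := by rw [hdrop]; rfl
    have hsome : gg[k]? = some row := by
      rw [List.getElem?_drop] at h0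
      simpa using h0
    have hrow2 : gg[k]?.getD [] = row := by rw [hsome]; rfl
    have hrow : gg.getD k [] = row := by rw [List.getD_eq_getElem?_getD, hrow2]
    have hdrop' : gg.drop (k + 1) = rest' := by
      have h1 := congrArg (List.drop 1) hdrop
      rw [List.drop_drop] at h1
      simpa using h1
    subst hv hd1 hd2 hpr
    rw [List.foldl_cons]
    simp only []
    rw [pvShifted_step gg wn 0 (by decide) k hk,
        pvShifted_step gg wn (-1) (by decide) k hk,
        pvShifted_step gg wn 1 (by decide) k hk]
    have hinner : (PySem.List.pyRange 0 (↑wn) 1).foldl (fun t x =>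
        if PySem.List.pyGetD row x "" = player then
          t + (PySem.List.pyGetD (pvSrow gg wn 0 (by decide) ((↑k : Int) + 1)) x 0
            + PySem.List.pyGetD (pvSrow gg wn (-1) (by decide) ((↑k : Int) + 1)) x 0
            + PySem.List.pyGetD (pvSrow gg wn 1 (by decide) ((↑k : Int) + 1)) x 0)
        else t) t0 = t0 + pvRowDown gg wn player k := by
      rw [PySem.List.pyRange_zero_natCast, List.foldl_map]
      rw [show (fun (t : Int) (x : Nat) =>
            if PySem.List.pyGetD row (↑x) "" = player then
              t + (PySem.List.pyGetD (pvSrow gg wn 0 (by decide) ((↑k : Int) + 1)) (↑x) 0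
                + PySem.List.pyGetD (pvSrow gg wn (-1) (by decide) ((↑k : Int) + 1)) (↑x) 0
                + PySem.List.pyGetD (pvSrow gg wn 1 (by decide) ((↑k : Int) + 1)) (↑x) 0)
            else t)
          = (fun (t : Int) (x : Nat) => t +
              (if PySem.List.pyGetD row (↑x) "" = player then
                PySem.List.pyGetD (pvSrow gg wn 0 (by decide) ((↑k : Int) + 1)) (↑x) 0
                + PySem.List.pyGetD (pvSrow gg wn (-1) (by decide) ((↑k : Int) + 1)) (↑x) 0
                + PySem.List.pyGetD (pvSrow gg wn 1 (by decide) ((↑k : Int) + 1)) (↑x) 0 else 0)) by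
        funext t x; split_ifs <;> simp]
      rw [PySem.List.foldl_add]
      congr 1
      unfold pvRowDown
      apply pvSum_congr
      intro x hxw
      have hcell : PySem.List.pyGetD row (↑x) "" = pvCell gg (↑x) (↑k) := by
        rw [← hrow]
        unfold pvCell
        rw [PySem.List.pyGetD_natCast gg]
      rw [hcell]
      unfold pvSrow
      rw [pv_getD_map_range _ 0 wn x hxw, pv_getD_map_range _ 0 wn x hxw,
          pv_getD_map_range _ 0 wn x hxw]
      unfold pvD
      rw [show ((k : Int) + 1 - 2) = (k : Int) + -1 by ring,
          show ((x : Int) + 0) = (x : Int) by ring]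
    rw [hinner]
    have hcast : ((k + 1 : Nat) : Int) = (↑k : Int) + 1 := by push_cast; ring
    rw [show ((↑k : Int) + 1) = ((k + 1 : Nat) : Int) from hcast.symm]
    rw [ih (k + 1) (t0 + pvRowDown gg wn player k) _ _ _ _ hdrop' rfl rfl rfl
        (by simp [pvSPR]; exact hrow2.symm)]
    rw [show gg.length - k = (gg.length - (k + 1)) + 1 by omega, pvSum_cons]
    have hsum : pvSum (gg.length - (k + 1)) (fun j => pvRowDown gg wn player (k + 1 + j))
        = pvSum (gg.length - (k + 1)) (fun j => pvRowDown gg wn player (k + (j + 1))) := by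
      apply pvSum_congr
      intro j hj
      congr 1
      omega
    rw [hsum]
    simp only [Nat.add_zero]
    ring

lemma pvSweep_eq (gg : List (List String)) (wn : Nat) (player : String) :
    pvSweep (↑wn) player gg = pvSum gg.length (fun k => pvRowDown gg wn player k) := by
  unfold pvSweep
  simp only [Int.toNat_natCast]
  rw [pvSweep_aux gg wn player gg 0 0 (List.replicate wn 0) (List.replicate wn 0)
      (List.replicate wn 0) (List.replicate wn "") (by rfl)
      (pvSrow_nonpos gg wn 0 (by decide) 0 (by omega)).symm
      (pvSrow_nonpos gg wn (-1) (by decide) 0 (by omega)).symm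
      (pvSrow_nonpos gg wn 1 (by decide) 0 (by omega)).symm
      (by simp [pvSPR])]
  simp


lemma foldl_body_eq : ∀ (n : Nat) (F : Int → Nat → Int) (G : Nat → Int),
    (∀ a k, k < n → F a k = a + G k) → ∀ a : Int,
    List.foldl F a (List.range n) = a + pvSum n G := by
  intro n
  induction n with
  | zero => intro F G hF a; simp [pvSum]
  | succ n ih =>
    intro F G hF a
    rw [List.range_succ, List.foldl_append, List.foldl_cons, List.foldl_nil]
    rw [ih F G (fun a k hk => hF a k (by omega)) a]
    rw [hF _ n (by omega), pvSum_succ]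
    ring

lemma len_moves (board : List (List String)) (wn m : Nat)
    (hw : (PySem.List.pyGetD board 0 []).length = wn) (hm : board.length = m)
    (x y : Nat) (hx : x < wn) (hy : y < m) :
    ((get_valid_moves_for_unit board ((x : Int), (y : Int))).length : Int)
      = pvD board (↑wn) (↑m) 1 0 (by decide) (↑x) (↑y)
        + pvD board (↑wn) (↑m) (-1) 0 (by decide) (↑x) (↑y)
        + pvD board (↑wn) (↑m) 0 1 (by decide) (↑x) (↑y)
        + pvD board (↑wn) (↑m) 0 (-1) (by decide) (↑x) (↑y)
        + pvD board (↑wn) (↑m) 1 1 (by decide) (↑x) (↑y)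
        + pvD board (↑wn) (↑m) (-1) (-1) (by decide) (↑x) (↑y)
        + pvD board (↑wn) (↑m) 1 (-1) (by decide) (↑x) (↑y)
        + pvD board (↑wn) (↑m) (-1) 1 (by decide) (↑x) (↑y) := by
  unfold get_valid_moves_for_unit
  simp only [hw, hm, pvDirs, List.foldl_cons, List.foldl_nil, List.nil_append,
    List.length_append, Int.toNat_natCast]
  push_cast
  rw [pvWalkA_len board (↑wn) (↑m) 1 0 (by decide) (wn + m + 2) (↑x + 1) (↑y + 0)
        (by have := pvMu_le (↑wn) (↑m) 1 0 (↑x + 1) (↑y + 0) (by omega) (by omega) (by omega) (by omega) (by omega) (by omega); simpa using this),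
      pvWalkA_len board (↑wn) (↑m) (-1) 0 (by decide) (wn + m + 2) (↑x + -1) (↑y + 0)
        (by have := pvMu_le (↑wn) (↑m) (-1) 0 (↑x + -1) (↑y + 0) (by omega) (by omega) (by omega) (by omega) (by omega) (by omega); simpa using this),
      pvWalkA_len board (↑wn) (↑m) 0 1 (by decide) (wn + m + 2) (↑x + 0) (↑y + 1)
        (by have := pvMu_le (↑wn) (↑m) 0 1 (↑x + 0) (↑y + 1) (by omega) (by omega) (by omega) (by omega) (by omega) (by omega); simpa using this),
      pvWalkA_len board (↑wn) (↑m) 0 (-1) (by decide) (wn + m + 2) (↑x + 0) (↑y + -1)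
        (by have := pvMu_le (↑wn) (↑m) 0 (-1) (↑x + 0) (↑y + -1) (by omega) (by omega) (by omega) (by omega) (by omega) (by omega); simpa using this),
      pvWalkA_len board (↑wn) (↑m) 1 1 (by decide) (wn + m + 2) (↑x + 1) (↑y + 1)
        (by have := pvMu_le (↑wn) (↑m) 1 1 (↑x + 1) (↑y + 1) (by omega) (by omega) (by omega) (by omega) (by omega) (by omega); simpa using this),
      pvWalkA_len board (↑wn) (↑m) (-1) (-1) (by decide) (wn + m + 2) (↑x + -1) (↑y + -1)
        (by have := pvMu_le (↑wn) (↑m) (-1) (-1) (↑x + -1) (↑y + -1) (by omega) (by omega) (by omega) (by omega) (by omega) (by omega); simpa using this),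
      pvWalkA_len board (↑wn) (↑m) 1 (-1) (by decide) (wn + m + 2) (↑x + 1) (↑y + -1)
        (by have := pvMu_le (↑wn) (↑m) 1 (-1) (↑x + 1) (↑y + -1) (by omega) (by omega) (by omega) (by omega) (by omega) (by omega); simpa using this),
      pvWalkA_len board (↑wn) (↑m) (-1) 1 (by decide) (wn + m + 2) (↑x + -1) (↑y + 1)
        (by have := pvMu_le (↑wn) (↑m) (-1) 1 (↑x + -1) (↑y + 1) (by omega) (by omega) (by omega) (by omega) (by omega) (by omega); simpa using this)]
  unfold pvD
  ring

lemma A_eq (board : List (List String)) (player : String) (wn m : Nat)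
    (hw : (PySem.List.pyGetD board 0 []).length = wn) (hm : board.length = m) :
    count_valid_moves_for_player board player = pvSum m (fun y => pvSum wn (fun x =>
      if pvCell board (↑x) (↑y) = player then
        pvD board (↑wn) (↑m) 1 0 (by decide) (↑x) (↑y)
          + pvD board (↑wn) (↑m) (-1) 0 (by decide) (↑x) (↑y)
          + pvD board (↑wn) (↑m) 0 1 (by decide) (↑x) (↑y)
          + pvD board (↑wn) (↑m) 0 (-1) (by decide) (↑x) (↑y)
          + pvD board (↑wn) (↑m) 1 1 (by decide) (↑x) (↑y)
          + pvD board (↑wn) (↑m) (-1) (-1) (by decide) (↑x) (↑y)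
          + pvD board (↑wn) (↑m) 1 (-1) (by decide) (↑x) (↑y)
          + pvD board (↑wn) (↑m) (-1) 1 (by decide) (↑x) (↑y)
      else 0)) := by
  simp only [count_valid_moves_for_player, hw, hm]
  rw [PySem.List.pyRange_zero_natCast m, List.foldl_map]
  have hG : ∀ (a : Int) (y : Nat), y < m →
      (PySem.List.pyRange 0 (↑wn) 1).foldl (fun total x =>
        if pvCell board x (↑y) = player then
          total + ((get_valid_moves_for_unit board (x, (↑y : Int))).length : Int)
        else total) a
      = a + pvSum wn (fun x =>
          if pvCell board (↑x) (↑y) = player then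
            ((get_valid_moves_for_unit board ((x : Int), (↑y : Int))).length : Int)
          else 0) := by
    intro a y hy
    rw [PySem.List.pyRange_zero_natCast, List.foldl_map]
    exact pvFold_ite wn (fun k => pvCell board (↑k) (↑y) = player)
      (fun k => ((get_valid_moves_for_unit board ((k : Int), (↑y : Int))).length : Int)) a
  rw [foldl_body_eq m _ _ (fun a y hy => hG a y hy) 0, zero_add]
  apply pvSum_congr
  intro y hy
  apply pvSum_congr
  intro x hx
  by_cases hp : pvCell board (↑x) (↑y) = player
  · rw [if_pos hp, if_pos hp]
    exact len_moves board wn m hw hm x y hx hy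
  · rw [if_neg hp, if_neg hp]

lemma pvRowDown_congr (g board : List (List String)) (wn m : Nat) (player : String)
    (hg : g.length = m)
    (hcellInt : ∀ x y : Int, 0 ≤ x → x < (wn : Int) → 0 ≤ y → y < (m : Int) →
      pvCell g x y = pvCell board x y)
    (k : Nat) (hk : k < m) :
    pvRowDown g wn player k = pvSum wn (fun x =>
      if pvCell board (↑x) (↑k) = player then
        pvD board (↑wn) (↑m) 0 (-1) (by decide) (↑x) (↑k)
          + pvD board (↑wn) (↑m) (-1) (-1) (by decide) (↑x) (↑k)
          + pvD board (↑wn) (↑m) 1 (-1) (by decide) (↑x) (↑k)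
      else 0) := by
  unfold pvRowDown
  rw [hg]
  apply pvSum_congr
  intro x hx
  rw [hcellInt (↑x) (↑k) (by omega) (by omega) (by omega) (by omega)]
  unfold pvD
  rw [pvCS_congr g board (↑wn) (↑m) 0 (-1) (by decide) hcellInt,
      pvCS_congr g board (↑wn) (↑m) (-1) (-1) (by decide) hcellInt,
      pvCS_congr g board (↑wn) (↑m) 1 (-1) (by decide) hcellInt]

lemma pvRowDown_reverse_congr (g board : List (List String)) (wn m : Nat) (player : String)
    (hg : g.length = m)
    (hcellInt : ∀ x y : Int, 0 ≤ x → x < (wn : Int) → 0 ≤ y → y < (m : Int) →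
      pvCell g x y = pvCell board x y)
    (k : Nat) (hk : k < m) :
    pvRowDown g.reverse wn player k = pvSum wn (fun x =>
      if pvCell board (↑x) (↑(m - 1 - k)) = player then
        pvD board (↑wn) (↑m) 0 1 (by decide) (↑x) (↑(m - 1 - k))
          + pvD board (↑wn) (↑m) (-1) 1 (by decide) (↑x) (↑(m - 1 - k))
          + pvD board (↑wn) (↑m) 1 1 (by decide) (↑x) (↑(m - 1 - k))
      else 0) := by
  have hh : (m : Int) = (g.length : Int) := by rw [hg]
  unfold pvRowDown
  rw [List.length_reverse, hg]
  apply pvSum_congr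
  intro x hx
  have hcellr : pvCell g.reverse (↑x) (↑k) = pvCell board (↑x) (↑(m - 1 - k)) := by
    rw [pvCell_reverse g (↑m) (↑x) (↑k) hh (by omega) (by omega),
        show ((m : Int) - 1 - (k : Int)) = ((m - 1 - k : Nat) : Int) by omega,
        hcellInt (↑x) (↑(m - 1 - k)) (by omega) (by omega) (by omega) (by omega)]
  rw [hcellr]
  unfold pvD
  rw [pvCS_flip g (↑wn) (↑m) 0 (-1) (by decide) 1 (by decide) (by norm_num) hh,
      pvCS_flip g (↑wn) (↑m) (-1) (-1) (by decide) 1 (by decide) (by norm_num) hh,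
      pvCS_flip g (↑wn) (↑m) 1 (-1) (by decide) 1 (by decide) (by norm_num) hh]
  rw [show ((m : Int) - 1 - ((k : Int) + -1)) = ((m - 1 - k : Nat) : Int) + 1 by omega]
  rw [pvCS_congr g board (↑wn) (↑m) 0 1 (by decide) hcellInt,
      pvCS_congr g board (↑wn) (↑m) (-1) 1 (by decide) hcellInt,
      pvCS_congr g board (↑wn) (↑m) 1 1 (by decide) hcellInt]

-- ===== VERDICT (by name: the statement is the Claim_ definition above) =====
theorem count_valid_moves_for_player_spec : Claim_equal_count_valid_moves_for_player := by
  intro board player hdom hpre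
  unfold Spec_count_valid_moves_for_player
  obtain ⟨hnil, hlen⟩ := hpre
  obtain ⟨b0, bs, rfl⟩ := List.exists_cons_of_ne_nil hnil
  have hlen' : ∀ r ∈ (b0 :: bs), b0.length ≤ r.length := hlen
  have hw : (PySem.List.pyGetD (b0 :: bs) 0 ([] : List String)).length = b0.length := by
    rw [PySem.List.pyGetD_zero_cons]
  have hm : (b0 :: bs).length = bs.length + 1 := by simp
  rw [A_eq (b0 :: bs) player b0.length (bs.length + 1) hw hm]
  simp only [count_valid_moves_for_player_alt]
  rw [PySem.List.pyGetD_zero_cons]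
  have hsl : (b0 :: bs).map (fun r => PySem.List.slice r none (some ((b0.length : Nat) : Int)))
      = (b0 :: bs).map (fun r => r.take b0.length) := by
    apply List.map_congr_left
    intro r _
    rw [PySem.List.slice_to r (Int.natCast_nonneg _), Int.toNat_natCast]
  rw [hsl]
  set G := (b0 :: bs).map (fun r => r.take b0.length) with hGdef
  have hGlen : G.length = bs.length + 1 := by rw [hGdef]; simp
  have hcellNat : ∀ (x y : Nat), x < b0.length → y < bs.length + 1 →
      pvCell G (↑x) (↑y) = pvCell (b0 :: bs) (↑x) (↑y) := by
    intro x y hx hy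
    simp only [pvCell, PySem.List.pyGetD_natCast]
    have hyG : y < G.length := by omega
    have hyb : y < (b0 :: bs).length := by simp; omega
    have hblen : b0.length ≤ ((b0 :: bs)[y]'hyb).length := hlen' _ (List.getElem_mem _)
    rw [List.getD_eq_getElem G _ hyG, List.getD_eq_getElem (b0 :: bs) _ hyb]
    have hGy : G[y]'hyG = ((b0 :: bs)[y]'hyb).take b0.length := by
      have h2 : G[y]? = some (((b0 :: bs)[y]'hyb).take b0.length) := by
        rw [hGdef, List.getElem?_map, List.getElem?_eq_getElem hyb]
        rfl
      exact Option.some.inj ((List.getElem?_eq_getElem _).symm.trans h2)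
    rw [hGy]
    rw [List.getD_eq_getElem _ _ (by rw [List.length_take]; omega),
        List.getD_eq_getElem _ _ (by omega), List.getElem_take]
  have hcellInt : ∀ x y : Int, 0 ≤ x → x < (b0.length : Int) → 0 ≤ y →
      y < ((bs.length + 1 : Nat) : Int) → pvCell G x y = pvCell (b0 :: bs) x y := by
    intro x y hx0 hx1 hy0 hy1
    have := hcellNat x.toNat y.toNat (by omega) (by omega)
    rwa [Int.toNat_of_nonneg hx0, Int.toNat_of_nonneg hy0] at this
  -- component 1: horizontal passes
  rw [pvMapSum G (pvHoriz (↑b0.length) player), hGlen]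
  have hc1 : pvSum (bs.length + 1) (fun i => pvHoriz (↑b0.length) player (G.getD i []))
      = pvSum (bs.length + 1) (fun y => pvSum b0.length (fun x =>
          if pvCell (b0 :: bs) (↑x) (↑y) = player then
            pvD (b0 :: bs) (↑b0.length) (↑(bs.length + 1)) (-1) 0 (by decide) (↑x) (↑y)
              + pvD (b0 :: bs) (↑b0.length) (↑(bs.length + 1)) 1 0 (by decide) (↑x) (↑y)
          else 0)) := by
    apply pvSum_congr
    intro y hy
    have hyG : y < G.length := by omega
    have hrlen : (G.getD y []).length = b0.length := by
      rw [List.getD_eq_getElem G _ hyG]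
      have hyb : y < (b0 :: bs).length := by simp; omega
      have hGy : G[y]'hyG = ((b0 :: bs)[y]'hyb).take b0.length := by
        have h2 : G[y]? = some (((b0 :: bs)[y]'hyb).take b0.length) := by
          rw [hGdef, List.getElem?_map, List.getElem?_eq_getElem hyb]
          rfl
        exact Option.some.inj ((List.getElem?_eq_getElem _).symm.trans h2)
      rw [hGy, List.length_take]
      have := hlen' _ (List.getElem_mem hyb)
      omega
    have hcellrow : ∀ k, k < b0.length →
        (G.getD y []).getD k "" = pvCell (b0 :: bs) (↑k) (↑y) := by
      intro k hk
      have h1 : (G.getD y []).getD k "" = pvCell G (↑k) (↑y) := by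
        simp only [pvCell, PySem.List.pyGetD_natCast]
      rw [h1, hcellNat k y hk hy]
    exact horiz_eq (b0 :: bs) b0.length (bs.length + 1) player y hy (G.getD y []) hrlen hcellrow
  rw [hc1]
  -- component 2: downward sweep
  rw [pvSweep_eq G b0.length player, hGlen]
  have hc2 : pvSum (bs.length + 1) (fun k => pvRowDown G b0.length player k)
      = pvSum (bs.length + 1) (fun k => pvSum b0.length (fun x =>
          if pvCell (b0 :: bs) (↑x) (↑k) = player then
            pvD (b0 :: bs) (↑b0.length) (↑(bs.length + 1)) 0 (-1) (by decide) (↑x) (↑k)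
              + pvD (b0 :: bs) (↑b0.length) (↑(bs.length + 1)) (-1) (-1) (by decide) (↑x) (↑k)
              + pvD (b0 :: bs) (↑b0.length) (↑(bs.length + 1)) 1 (-1) (by decide) (↑x) (↑k)
          else 0)) := by
    apply pvSum_congr
    intro k hk
    exact pvRowDown_congr G (b0 :: bs) b0.length (bs.length + 1) player hGlen hcellInt k hk
  rw [hc2]
  -- component 3: upward sweep (reverse)
  rw [pvSweep_eq G.reverse b0.length player, List.length_reverse, hGlen]
  have hc3 : pvSum (bs.length + 1) (fun k => pvRowDown G.reverse b0.length player k)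
      = pvSum (bs.length + 1) (fun k => pvSum b0.length (fun x =>
          if pvCell (b0 :: bs) (↑x) (↑(bs.length + 1 - 1 - k)) = player then
            pvD (b0 :: bs) (↑b0.length) (↑(bs.length + 1)) 0 1 (by decide) (↑x) (↑(bs.length + 1 - 1 - k))
              + pvD (b0 :: bs) (↑b0.length) (↑(bs.length + 1)) (-1) 1 (by decide) (↑x) (↑(bs.length + 1 - 1 - k))
              + pvD (b0 :: bs) (↑b0.length) (↑(bs.length + 1)) 1 1 (by decide) (↑x) (↑(bs.length + 1 - 1 - k))
          else 0)) := by
    apply pvSum_congr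
    intro k hk
    exact pvRowDown_reverse_congr G (b0 :: bs) b0.length (bs.length + 1) player hGlen hcellInt k hk
  rw [hc3]
  rw [pvSum_reflect (bs.length + 1) (fun y => pvSum b0.length (fun x =>
      if pvCell (b0 :: bs) (↑x) (↑y) = player then
        pvD (b0 :: bs) (↑b0.length) (↑(bs.length + 1)) 0 1 (by decide) (↑x) (↑y)
          + pvD (b0 :: bs) (↑b0.length) (↑(bs.length + 1)) (-1) 1 (by decide) (↑x) (↑y)
          + pvD (b0 :: bs) (↑b0.length) (↑(bs.length + 1)) 1 1 (by decide) (↑x) (↑y)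
      else 0))]
  -- combine
  rw [← pvSum_add, ← pvSum_add]
  apply pvSum_congr
  intro y hy
  rw [← pvSum_add, ← pvSum_add]
  apply pvSum_congr
  intro x hx
  split_ifs <;> ring
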